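-- pv_equiv track=rewrite | github.com/bburger11/adventofcode | 2024/day2.py | check_if_safe
-- ===== SOURCE A (Python) =====
-- def check_if_safe(report):
--     # Check for duplicates
--     if len(report) != len(set(report)):
--         return False
--     # Check if report strictly inc/dec
--     strictly_increasing_or_decreasing = True
--     inc = False
--     dec = False
--     for i, level in enumerate(report):
--         # Compare the first two to determine if increasing or decreasing
--         if i == 0:
--             if level < report[i + 1]:
--                 inc = True
--             elif level > report[i + 1]:
--                 dec = True
--         # Search is complete if we reach the last element
--         if i == len(report) - 1:
--             break
--         if inc and level > report[i + 1]:
--             strictly_increasing_or_decreasing = False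
--             break
--         if dec and level < report[i + 1]:
--             strictly_increasing_or_decreasing = False
--             break
--     if not strictly_increasing_or_decreasing:
--         return False
--     # Check for gaps of more than 3
--     differ_by_at_most_three = True
--     sorted_report = sorted(report)
--     for i, level in enumerate(sorted_report):
--         # Search is complete if we reach the last element
--         if i == len(sorted_report) - 1:
--             break
--         if sorted_report[i + 1] - level > 3:
--             differ_by_at_most_three = False
--             break
--     if not differ_by_at_most_three:
--         return False
--     return True
-- ===== SOURCE B (Python) =====
-- def check_if_safe(report):
--     if not report:
--         return True
--     direction = report[1] - report[0]
--     for a, b in zip(report, report[1:]):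
--         diff = b - a
--         if diff == 0 or (diff > 0) != (direction > 0) or abs(diff) > 3:
--             return False
--     return True
-- ===== Notes on version B (the rewrite author's own statement) =====
-- stated objective: simpler
-- what changed: Replaced A's three separate passes (set-based duplicate count, direction-seeded monotonicity scan with breaks, and a gap scan over a sorted copy) by one linear scan over adjacent pairs that checks zero diff, direction consistency and |diff| <= 3 at once, with no sorting and no set.
import Mathlib
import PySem

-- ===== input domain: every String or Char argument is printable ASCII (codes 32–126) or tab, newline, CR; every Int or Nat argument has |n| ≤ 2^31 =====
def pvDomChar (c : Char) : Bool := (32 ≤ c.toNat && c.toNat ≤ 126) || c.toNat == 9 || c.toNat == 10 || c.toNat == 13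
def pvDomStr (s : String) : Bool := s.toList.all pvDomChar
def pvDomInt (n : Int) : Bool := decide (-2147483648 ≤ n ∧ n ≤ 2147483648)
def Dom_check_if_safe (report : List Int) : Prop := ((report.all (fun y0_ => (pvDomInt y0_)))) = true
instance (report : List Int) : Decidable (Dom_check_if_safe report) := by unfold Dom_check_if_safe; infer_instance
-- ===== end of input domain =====

-- B replaces A's three passes (duplicate count via set, direction-seeded monotonicity scan,
-- gap scan over a sorted copy) by one linear scan over adjacent pairs; objective: simpler.

-- ===== PORT A =====
-- A's first loop: index i, state (inc, dec); `none` = IndexError (report[i+1] out of range at i = 0)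
def pvMonoLoop (report : List Int) (i : Nat) (inc dec : Bool) : Option Bool :=
  if h : i < report.length then
    let level := report[i]
    let step : Option (Bool × Bool) :=
      if i = 0 then
        match PySem.List.pyGet? report ((i : Int) + 1) with
        | none => none
        | some nxt =>
          if level < nxt then some (true, dec)
          else if nxt < level then some (inc, true)
          else some (inc, dec)
      else some (inc, dec)
    match step with
    | none => none
    | some (inc', dec') =>
      if i = report.length - 1 then some true
      else
        match PySem.List.pyGet? report ((i : Int) + 1) with
        | none => none
        | some nxt =>
          if inc' && decide (nxt < level) then some false
          else if dec' && decide (level < nxt) then some false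
          else pvMonoLoop report (i + 1) inc' dec'
  else some true
termination_by report.length - i

-- A's second loop, over the sorted copy
def pvGapLoop (s : List Int) (i : Nat) : Option Bool :=
  if h : i < s.length then
    if i = s.length - 1 then some true
    else
      match PySem.List.pyGet? s ((i : Int) + 1) with
      | none => none
      | some nxt => if 3 < nxt - s[i] then some false else pvGapLoop s (i + 1)
  else some true
termination_by s.length - i

def check_if_safe (report : List Int) : Bool :=
  if report.length ≠ (PySem.Set.ofList report).length then false
  else
    match pvMonoLoop report 0 false false with
    | none => false      -- Python raises IndexError here (single-element report); excluded by Pre_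
    | some strictly =>
      if !strictly then false
      else
        let sorted_report := PySem.List.sorted report (fun x => x) false
        match pvGapLoop sorted_report 0 with
        | none => false
        | some ok => if !ok then false else true

-- ===== PORT B =====
-- B's single loop over zip(report, report[1:])
def pvAltLoop (direction : Int) : List (Int × Int) → Bool
  | [] => true
  | (a, b) :: rest =>
    let diff := b - a
    if diff = 0 ∨ decide (0 < diff) ≠ decide (0 < direction) ∨ 3 < |diff| then false
    else pvAltLoop direction rest

def check_if_safe_alt (report : List Int) : Bool :=
  match report with
  | [] => true
  | r0 :: rest =>
    match rest with
    | [] => false        -- Python B raises IndexError at report[1]; excluded by Pre_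
    | r1 :: _ => pvAltLoop (r1 - r0) (report.zip rest)

-- ===== PRECONDITION & SPEC =====
-- Pre_ excludes exactly the single-element reports, on which both A and B raise IndexError.
def Pre_check_if_safe (report : List Int) : Prop := report.length ≠ 1
instance (report : List Int) : Decidable (Pre_check_if_safe report) := by unfold Pre_check_if_safe; infer_instance
def pvWitness_check_if_safe : List Int := [1, 2, 4]

def Spec_check_if_safe (report : List Int) (out : Bool) : Prop := out = check_if_safe_alt report
instance (report : List Int) (out : Bool) : Decidable (Spec_check_if_safe report out) := by unfold Spec_check_if_safe; infer_instance

-- ===== CLAIM (what is proved, stated in full; the proofs are below) =====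
def Claim_equal_check_if_safe : Prop := ∀ (report : List Int), Dom_check_if_safe report → Pre_check_if_safe report → Spec_check_if_safe report (check_if_safe report)

-- ===== LEMMAS AND PROOFS =====

theorem pvMonoLoop_inc (s : List Int) :
    ∀ n i, s.length - i ≤ n → 1 ≤ i →
      pvMonoLoop s i true false
        = some (decide ((s.drop i).IsChain (fun a b => a ≤ b))) := by
  intro n
  induction n with
  | zero =>
    intro i hi h1
    have h : ¬ i < s.length := by omega
    rw [pvMonoLoop]
    simp [h, List.drop_eq_nil_of_le (by omega : s.length ≤ i)]
  | succ n ih =>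
    intro i hi h1
    rw [pvMonoLoop]
    by_cases h : i < s.length
    · have h0 : ¬ i = 0 := by omega
      by_cases hl : i = s.length - 1
      · have hd : s.drop i = [s[i]] := by
          rw [← List.getElem_cons_drop h, List.drop_eq_nil_of_le (by omega)]
        rw [dif_pos h]
        dsimp only
        rw [if_neg h0]
        dsimp only
        rw [if_pos hl, hd]
        simp
      · have hlt : i + 1 < s.length := by omega
        have hget : PySem.List.pyGet? s ((i : Nat) + 1 : Int) = some s[i+1] := by
          have := PySem.List.pyGet?_natCast (xs := s) (n := i + 1)
          push_cast at this
          rw [this, List.getElem?_eq_getElem hlt]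
        have hd : s.drop i = s[i] :: s[i+1] :: s.drop (i+2) := by
          rw [List.getElem_cons_drop hlt, List.getElem_cons_drop h]
        rw [dif_pos h]
        dsimp only
        rw [if_neg h0]
        dsimp only
        rw [if_neg hl, hget]
        dsimp only
        by_cases hc : s[i+1] < s[i]
        · rw [if_pos (by simp [hc]), hd, Option.some_inj, eq_comm, decide_eq_false_iff_not,
            List.isChain_cons_cons]
          omega
        · have hd2 : s.drop (i+1) = s[i+1] :: s.drop (i+2) := by
            rw [List.getElem_cons_drop hlt]
          rw [if_neg (by simp [hc]), if_neg (by simp), ih (i+1) (by omega) (by omega), hd2,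
            Option.some_inj, decide_eq_decide, hd, List.isChain_cons_cons]
          exact ⟨fun hch => ⟨by omega, hch⟩, And.right⟩
    · have hle : s.length ≤ i := by omega
      rw [dif_neg h, List.drop_eq_nil_of_le hle]
      simp

theorem pvMonoLoop_dec (s : List Int) :
    ∀ n i, s.length - i ≤ n → 1 ≤ i →
      pvMonoLoop s i false true
        = some (decide ((s.drop i).IsChain (fun a b => b ≤ a))) := by
  intro n
  induction n with
  | zero =>
    intro i hi h1
    have h : ¬ i < s.length := by omega
    rw [pvMonoLoop]
    simp [h, List.drop_eq_nil_of_le (by omega : s.length ≤ i)]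
  | succ n ih =>
    intro i hi h1
    rw [pvMonoLoop]
    by_cases h : i < s.length
    · have h0 : ¬ i = 0 := by omega
      by_cases hl : i = s.length - 1
      · have hd : s.drop i = [s[i]] := by
          rw [← List.getElem_cons_drop h, List.drop_eq_nil_of_le (by omega)]
        rw [dif_pos h]
        dsimp only
        rw [if_neg h0]
        dsimp only
        rw [if_pos hl, hd]
        simp
      · have hlt : i + 1 < s.length := by omega
        have hget : PySem.List.pyGet? s ((i : Nat) + 1 : Int) = some s[i+1] := by
          have := PySem.List.pyGet?_natCast (xs := s) (n := i + 1)
          push_cast at this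
          rw [this, List.getElem?_eq_getElem hlt]
        have hd : s.drop i = s[i] :: s[i+1] :: s.drop (i+2) := by
          rw [List.getElem_cons_drop hlt, List.getElem_cons_drop h]
        rw [dif_pos h]
        dsimp only
        rw [if_neg h0]
        dsimp only
        rw [if_neg hl, hget]
        dsimp only
        by_cases hc : s[i] < s[i+1]
        · rw [if_neg (by simp), if_pos (by simp [hc]), hd, Option.some_inj, eq_comm,
            decide_eq_false_iff_not, List.isChain_cons_cons]
          omega
        · have hd2 : s.drop (i+1) = s[i+1] :: s.drop (i+2) := by
            rw [List.getElem_cons_drop hlt]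
          rw [if_neg (by simp), if_neg (by simp [hc]), ih (i+1) (by omega) (by omega), hd2,
            Option.some_inj, decide_eq_decide, hd, List.isChain_cons_cons]
          exact ⟨fun hch => ⟨by omega, hch⟩, And.right⟩
    · have hle : s.length ≤ i := by omega
      rw [dif_neg h, List.drop_eq_nil_of_le hle]
      simp

theorem pvGapLoop_spec (s : List Int) :
    ∀ n i, s.length - i ≤ n →
      pvGapLoop s i = some (decide ((s.drop i).IsChain (fun a b => b - a ≤ 3))) := by
  intro n
  induction n with
  | zero =>
    intro i hi
    have h : ¬ i < s.length := by omega
    rw [pvGapLoop]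
    simp [h, List.drop_eq_nil_of_le (by omega : s.length ≤ i)]
  | succ n ih =>
    intro i hi
    rw [pvGapLoop]
    by_cases h : i < s.length
    · by_cases hl : i = s.length - 1
      · have hd : s.drop i = [s[i]] := by
          rw [← List.getElem_cons_drop h, List.drop_eq_nil_of_le (by omega)]
        rw [dif_pos h, if_pos hl, hd]
        simp
      · have h1 : i + 1 < s.length := by omega
        have hget : PySem.List.pyGet? s ((i : Nat) + 1 : Int) = some s[i+1] := by
          have := PySem.List.pyGet?_natCast (xs := s) (n := i + 1)
          push_cast at this
          rw [this, List.getElem?_eq_getElem h1]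
        have hd : s.drop i = s[i] :: s[i+1] :: s.drop (i+2) := by
          rw [List.getElem_cons_drop h1, List.getElem_cons_drop h]
        rw [dif_pos h, if_neg hl, hget]
        dsimp only
        by_cases hc : 3 < s[i+1] - s[i]
        · rw [if_pos hc, hd, Option.some_inj, eq_comm, decide_eq_false_iff_not,
            List.isChain_cons_cons]
          omega
        · have hd2 : s.drop (i+1) = s[i+1] :: s.drop (i+2) := by
            rw [List.getElem_cons_drop h1]
          rw [if_neg hc, ih (i+1) (by omega), hd2, Option.some_inj, decide_eq_decide, hd,
            List.isChain_cons_cons]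
          exact ⟨fun hch => ⟨by omega, hch⟩, And.right⟩
    · have hle : s.length ≤ i := by omega
      rw [dif_neg h, List.drop_eq_nil_of_le hle]
      simp

theorem pvAltLoop_zip (d : Int) (l : List Int) :
    pvAltLoop d (l.zip l.tail)
      = decide (l.IsChain (fun a b =>
          ¬(b - a = 0 ∨ decide (0 < b - a) ≠ decide (0 < d) ∨ 3 < |b - a|))) := by
  induction l with
  | nil => rfl
  | cons a rest ih =>
    cases rest with
    | nil => simp [pvAltLoop]
    | cons b t =>
      show pvAltLoop d ((a, b) :: (b :: t).zip t) = _
      rw [pvAltLoop]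
      by_cases hc : b - a = 0 ∨ decide (0 < b - a) ≠ decide (0 < d) ∨ 3 < |b - a|
      · rw [if_pos hc, eq_comm, decide_eq_false_iff_not, List.isChain_cons_cons]
        tauto
      · have hz : ((b :: t).zip ((b :: t).tail)) = (b :: t).zip t := rfl
        rw [if_neg hc, ← hz, ih, decide_eq_decide, List.isChain_cons_cons]
        exact ⟨fun h => ⟨hc, h⟩, And.right⟩

theorem pvMonoLoop_start_inc (r0 r1 : Int) (t : List Int) (hr : r0 < r1) :
    pvMonoLoop (r0 :: r1 :: t) 0 false false
      = some (decide ((r1 :: t).IsChain (fun a b => a ≤ b))) := by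
  have hget : PySem.List.pyGet? (r0 :: r1 :: t) (((0:Nat) : Int) + 1) = some r1 := by
    simp [PySem.List.pyGet?, PySem.List.pyIdx?]
  rw [pvMonoLoop, dif_pos (by simp)]
  dsimp only
  rw [if_pos rfl, hget]
  dsimp only [List.getElem_cons_zero]
  rw [if_pos hr]
  dsimp only
  rw [if_neg (by simp), if_neg (by simp [not_lt.mpr (le_of_lt hr)]), if_neg (by simp)]
  have := pvMonoLoop_inc (r0 :: r1 :: t) ((r0 :: r1 :: t).length) 1 (by omega) (by omega)
  rw [this]
  rfl

theorem pvMonoLoop_start_dec (r0 r1 : Int) (t : List Int) (hr : r1 < r0) :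
    pvMonoLoop (r0 :: r1 :: t) 0 false false
      = some (decide ((r1 :: t).IsChain (fun a b => b ≤ a))) := by
  have hget : PySem.List.pyGet? (r0 :: r1 :: t) (((0:Nat) : Int) + 1) = some r1 := by
    simp [PySem.List.pyGet?, PySem.List.pyIdx?]
  rw [pvMonoLoop, dif_pos (by simp)]
  dsimp only
  rw [if_pos rfl, hget]
  dsimp only [List.getElem_cons_zero]
  rw [if_neg (not_lt.mpr hr.le), if_pos hr]
  dsimp only
  rw [if_neg (by simp), if_neg (by simp), if_neg (by simp [not_lt.mpr hr.le])]
  have := pvMonoLoop_dec (r0 :: r1 :: t) ((r0 :: r1 :: t).length) 1 (by omega) (by omega)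
  rw [this]
  rfl

-- duplicate report ⇒ the set is strictly shorter
theorem pvOfList_len_ne (xs : List Int) (h : ¬ xs.Nodup) :
    (PySem.Set.ofList xs).length ≠ xs.length := by
  intro hlen
  apply h
  have hnd := PySem.Set.nodup_ofList (xs := xs)
  have hfs : (PySem.Set.ofList xs).toFinset = xs.toFinset := by
    ext y; simp [List.mem_toFinset, PySem.Set.mem_ofList]
  have h1 : (PySem.Set.ofList xs).toFinset.card = (PySem.Set.ofList xs).length :=
    List.toFinset_card_of_nodup hnd
  have h2 : xs.toFinset.card = xs.dedup.length := List.card_toFinset xs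
  have h3 : xs.dedup.length = xs.length := by rw [hfs] at h1; omega
  have := (List.dedup_sublist xs).eq_of_length h3
  rw [← this]; exact List.nodup_dedup xs

theorem pvChain_lt_nodup (l : List Int) (h : l.IsChain (fun a b => a < b)) : l.Nodup :=
  (List.isChain_iff_pairwise.mp h).imp (fun hab => ne_of_lt hab)

theorem pvChain_gt_nodup (l : List Int) (h : l.IsChain (fun a b => b < a)) : l.Nodup :=
  List.nodup_reverse.mp (pvChain_lt_nodup l.reverse (List.isChain_reverse.mpr h))

-- unpacking B's pair condition
theorem pvP_elim {d a b : Int}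
    (h : ¬(b - a = 0 ∨ decide (0 < b - a) ≠ decide (0 < d) ∨ 3 < |b - a|)) :
    b - a ≠ 0 ∧ (0 < b - a ↔ 0 < d) ∧ |b - a| ≤ 3 := by
  simp only [not_or, ne_eq, not_not, not_lt] at h
  exact ⟨h.1, decide_eq_decide.mp h.2.1, h.2.2⟩

theorem pvP_intro {d a b : Int} (h1 : b - a ≠ 0) (h2 : 0 < b - a ↔ 0 < d) (h3 : |b - a| ≤ 3) :
    ¬(b - a = 0 ∨ decide (0 < b - a) ≠ decide (0 < d) ∨ 3 < |b - a|) := by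
  simp only [not_or, ne_eq, not_not, not_lt]
  exact ⟨h1, decide_eq_decide.mpr h2, h3⟩

-- ===== VERDICT (by name: the statement is the Claim_ definition above) =====
theorem check_if_safe_spec : Claim_equal_check_if_safe := by
  intro report _hdom hpre
  unfold Spec_check_if_safe
  match report with
  | [] =>
    show check_if_safe [] = true
    unfold check_if_safe
    rw [if_neg (by simp), pvMonoLoop, dif_neg (by simp)]
    dsimp only
    have hs : PySem.List.sorted ([] : List Int) (fun x => x) false = [] := rfl
    rw [hs, pvGapLoop_spec [] 0 0 (by simp)]
    simp
  | [r0] => exact absurd rfl hpre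
  | r0 :: r1 :: t =>
    have hB : check_if_safe_alt (r0 :: r1 :: t)
        = decide ((r0 :: r1 :: t).IsChain (fun a b =>
            ¬(b - a = 0 ∨ decide (0 < b - a) ≠ decide (0 < (r1 - r0)) ∨ 3 < |b - a|))) :=
      pvAltLoop_zip (r1 - r0) (r0 :: r1 :: t)
    rw [hB]
    by_cases hnd : (r0 :: r1 :: t).Nodup
    · have hofl : (PySem.Set.ofList (r0 :: r1 :: t)).length = (r0 :: r1 :: t).length :=
        by rw [PySem.Set.ofList_eq_self_of_nodup _ hnd]
      unfold check_if_safe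
      rw [if_neg (by simp [hofl])]
      have hr01 : r0 ≠ r1 := by
        intro h
        exact (List.nodup_cons.mp hnd).1 (h ▸ List.mem_cons_self)
      rcases lt_or_gt_of_ne hr01 with hr | hr
      · -- increasing direction
        have hdpos : 0 < r1 - r0 := by omega
        rw [pvMonoLoop_start_inc r0 r1 t hr]
        dsimp only
        by_cases hc : (r1 :: t).IsChain (fun a b => a ≤ b)
        · rw [if_neg (by simp [hc])]
          have hchain : (r0 :: r1 :: t).IsChain (fun a b : Int => a ≤ b) :=
            List.isChain_cons_cons.mpr ⟨hr.le, hc⟩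
          have hpw := List.isChain_iff_pairwise.mp hchain
          have hsorted : PySem.List.sorted (r0 :: r1 :: t) (fun x => x) false = r0 :: r1 :: t :=
            PySem.List.sorted_eq_self_of_pairwise _ _ hpw
          rw [hsorted, pvGapLoop_spec _ (r0 :: r1 :: t).length 0 (by omega), List.drop_zero]
          have hlt : (r0 :: r1 :: t).IsChain (fun a b : Int => a < b) :=
            ((hpw.and hnd).imp (fun h => lt_of_le_of_ne h.1 h.2)).isChain
          by_cases hX : (r0 :: r1 :: t).IsChain (fun a b : Int => b - a ≤ 3)
          · have hP : (r0 :: r1 :: t).IsChain (fun a b : Int =>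
                ¬(b - a = 0 ∨ decide (0 < b - a) ≠ decide (0 < (r1 - r0)) ∨ 3 < |b - a|)) := by
              rw [List.isChain_iff_getElem] at hlt hX ⊢
              intro i hi
              have h1 := hlt i hi
              have h2 := hX i hi
              exact pvP_intro (by omega) (by constructor <;> intro <;> omega)
                (by rw [abs_of_pos (by omega)]; omega)
            rw [decide_eq_true hX, decide_eq_true hP]
            rfl
          · have hnP : ¬ (r0 :: r1 :: t).IsChain (fun a b : Int =>
                ¬(b - a = 0 ∨ decide (0 < b - a) ≠ decide (0 < (r1 - r0)) ∨ 3 < |b - a|)) := by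
              intro hP
              exact hX (hP.imp (fun a b hp => by
                have := (pvP_elim hp).2.2
                have hab : b - a ≤ |b - a| := le_abs_self _
                omega))
            rw [decide_eq_false hX, decide_eq_false hnP]
            rfl
        · rw [if_pos (by simp [hc])]
          symm
          rw [decide_eq_false_iff_not]
          intro hP
          apply hc
          have := hP.imp (fun a b hp => by
            obtain ⟨h1, h2, _⟩ := pvP_elim hp
            exact (by omega : a ≤ b))
          exact (List.isChain_cons_cons.mp this).2
      · -- decreasing direction
        have hdneg : r1 - r0 < 0 := by omega
        rw [pvMonoLoop_start_dec r0 r1 t hr]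
        dsimp only
        by_cases hc : (r1 :: t).IsChain (fun a b => b ≤ a)
        · rw [if_neg (by simp [hc])]
          have hchain : (r0 :: r1 :: t).IsChain (fun a b : Int => b ≤ a) :=
            List.isChain_cons_cons.mpr ⟨hr.le, hc⟩
          have hle_rev : (r0 :: r1 :: t).reverse.IsChain (fun a b : Int => a ≤ b) :=
            List.isChain_reverse.mpr hchain
          have hpw_rev := List.isChain_iff_pairwise.mp hle_rev
          have hnd_rev : (r0 :: r1 :: t).reverse.Nodup := List.nodup_reverse.mpr hnd
          have hpw_lt_rev : (r0 :: r1 :: t).reverse.Pairwise (fun a b : Int => a < b) :=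
            (hpw_rev.and hnd_rev).imp (fun h => lt_of_le_of_ne h.1 h.2)
          have hsorted : PySem.List.sorted (r0 :: r1 :: t) (fun x => x) false
              = (r0 :: r1 :: t).reverse :=
            PySem.List.sorted_eq_of_perm_of_pairwise_lt _ _ _ (List.reverse_perm _) hpw_lt_rev
          rw [hsorted, pvGapLoop_spec _ (r0 :: r1 :: t).reverse.length 0 (by omega),
            List.drop_zero]
          have hgt : (r0 :: r1 :: t).IsChain (fun a b : Int => b < a) :=
            List.isChain_reverse.mp hpw_lt_rev.isChain
          have hrev_iff : (r0 :: r1 :: t).reverse.IsChain (fun a b : Int => b - a ≤ 3)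
              ↔ (r0 :: r1 :: t).IsChain (fun a b : Int => a - b ≤ 3) := List.isChain_reverse
          by_cases hX : (r0 :: r1 :: t).IsChain (fun a b : Int => a - b ≤ 3)
          · have hXr := hrev_iff.mpr hX
            have hP : (r0 :: r1 :: t).IsChain (fun a b : Int =>
                ¬(b - a = 0 ∨ decide (0 < b - a) ≠ decide (0 < (r1 - r0)) ∨ 3 < |b - a|)) := by
              rw [List.isChain_iff_getElem] at hgt hX ⊢
              intro i hi
              have h1 := hgt i hi
              have h2 := hX i hi
              exact pvP_intro (by omega) (by constructor <;> intro <;> omega)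
                (by rw [abs_of_neg (by omega)]; omega)
            rw [decide_eq_true hXr, decide_eq_true hP]
            rfl
          · have hXr : ¬ (r0 :: r1 :: t).reverse.IsChain (fun a b : Int => b - a ≤ 3) :=
              fun h => hX (hrev_iff.mp h)
            have hnP : ¬ (r0 :: r1 :: t).IsChain (fun a b : Int =>
                ¬(b - a = 0 ∨ decide (0 < b - a) ≠ decide (0 < (r1 - r0)) ∨ 3 < |b - a|)) := by
              intro hP
              exact hX (hP.imp (fun a b hp => by
                have := (pvP_elim hp).2.2
                have hab : a - b ≤ |b - a| := by rw [abs_sub_comm]; exact le_abs_self _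
                omega))
            rw [decide_eq_false hXr, decide_eq_false hnP]
            rfl
        · rw [if_pos (by simp [hc])]
          symm
          rw [decide_eq_false_iff_not]
          intro hP
          apply hc
          have := hP.imp (fun a b hp => by
            obtain ⟨h1, h2, _⟩ := pvP_elim hp
            exact (by omega : b ≤ a))
          exact (List.isChain_cons_cons.mp this).2
    · unfold check_if_safe
      rw [if_pos (fun h => pvOfList_len_ne _ hnd h.symm)]
      symm
      rw [decide_eq_false_iff_not]
      intro hP
      apply hnd
      rcases lt_trichotomy (r1 - r0) 0 with hd | hd | hd
      · exact pvChain_gt_nodup _ (hP.imp (fun a b hp => by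
          obtain ⟨h1, h2, _⟩ := pvP_elim hp
          omega))
      · have := (List.isChain_cons_cons.mp hP).1
        exact absurd hd (pvP_elim this).1.elim
      · exact pvChain_lt_nodup _ (hP.imp (fun a b hp => by
          obtain ⟨h1, h2, _⟩ := pvP_elim hp
          omega))
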